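-- pv_equiv track=rewrite | github.com/Sumant-Mourya/Office | ImageGeneration/batch_submit.py | is_retryable_quota_error
-- ===== SOURCE A (Python) =====
-- def is_retryable_quota_error(exc):
--     """Return True for transient rate-limit/quota style failures."""
--     msg = str(exc).lower()
--     retry_markers = (
--         "429",
--         "resource_exhausted",
--         "rate limit",
--         "too many requests",
--         "quota",
--         "try again later",
--     )
--     return any(marker in msg for marker in retry_markers)
-- ===== SOURCE B (Python) =====
-- MARKERS = (
--     "429",
--     "resource_exhausted",
--     "rate limit",
--     "too many requests",
--     "quota",
--     "try again later",
-- )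
--
--
-- def is_retryable_quota_error(exc):
--     """Return True for transient rate-limit/quota style failures.
--
--     Single left-to-right scan: at each position of the lowercased message,
--     check whether some marker starts there (prefix test), instead of running
--     six independent substring searches over the whole message.
--     """
--     msg = str(exc).lower()
--     for i in range(len(msg) + 1):
--         if any(msg.startswith(m, i) for m in MARKERS):
--             return True
--     return False
-- ===== Notes on version B (the rewrite author's own statement) =====
-- stated objective: alternative
-- what changed: Replaced six independent whole-message substring searches (any(marker in msg)) with one left-to-right scan over positions of the lowercased message that tests at each position whether some marker starts there (prefix test), returning at the first hit.
import Mathlib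
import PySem

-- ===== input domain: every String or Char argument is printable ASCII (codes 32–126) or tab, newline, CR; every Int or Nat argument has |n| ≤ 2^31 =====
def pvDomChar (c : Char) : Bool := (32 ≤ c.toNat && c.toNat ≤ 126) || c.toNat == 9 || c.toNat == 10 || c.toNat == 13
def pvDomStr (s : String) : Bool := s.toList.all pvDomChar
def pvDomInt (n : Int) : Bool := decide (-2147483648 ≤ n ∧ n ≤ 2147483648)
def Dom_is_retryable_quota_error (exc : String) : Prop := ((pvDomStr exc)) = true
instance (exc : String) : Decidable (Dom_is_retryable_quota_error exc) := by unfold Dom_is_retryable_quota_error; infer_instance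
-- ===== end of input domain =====

-- ===== PORT A =====
-- B replaces six whole-message substring searches with one positional scan; alternative structure, same cost class.
def is_retryable_quota_error (exc : String) : Bool :=
  let msg := PySem.Str.lower exc
  ["429", "resource_exhausted", "rate limit", "too many requests", "quota",
   "try again later"].any (fun marker => PySem.Str.isIn marker msg)

-- ===== PORT B =====
def pvMarkers : List (List Char) :=
  ["429".toList, "resource_exhausted".toList, "rate limit".toList,
   "too many requests".toList, "quota".toList, "try again later".toList]

-- the 'for i in range(len(msg)+1)' scan of Source B: walk the suffixes of msg, prefix-testing each marker
def pvScan (s : List Char) : Bool :=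
  match s with
  | [] => pvMarkers.any (fun m => PySem.Chars.startswith [] m)
  | _ :: rest =>
      pvMarkers.any (fun m => PySem.Chars.startswith s m) || pvScan rest

def is_retryable_quota_error_alt (exc : String) : Bool :=
  pvScan (PySem.Chars.lower exc.toList)

-- ===== PRECONDITION & SPEC =====
def Spec_is_retryable_quota_error (exc : String) (out : Bool) : Prop := out = is_retryable_quota_error_alt exc
instance (exc : String) (out : Bool) : Decidable (Spec_is_retryable_quota_error exc out) := by unfold Spec_is_retryable_quota_error; infer_instance

-- ===== CLAIM (what is proved, stated in full; the proofs are below) =====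
def Claim_equal_is_retryable_quota_error : Prop := ∀ (exc : String), Dom_is_retryable_quota_error exc → Spec_is_retryable_quota_error exc (is_retryable_quota_error exc)

-- ===== LEMMAS AND PROOFS =====

theorem pvScan_iff (s : List Char) :
    pvScan s = true ↔ ∃ m ∈ pvMarkers, ∃ j, m <+: s.drop j := by
  induction s with
  | nil =>
      simp [pvScan, List.any_eq_true, PySem.Chars.startswith_iff]
  | cons c rest ih =>
      simp only [pvScan, Bool.or_eq_true, List.any_eq_true,
        PySem.Chars.startswith_iff, ih]
      constructor
      · rintro (⟨m, hm, hp⟩ | ⟨m, hm, j, hp⟩)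
        · exact ⟨m, hm, 0, hp⟩
        · exact ⟨m, hm, j + 1, by simpa using hp⟩
      · rintro ⟨m, hm, j, hp⟩
        cases j with
        | zero => exact Or.inl ⟨m, hm, by simpa using hp⟩
        | succ j => exact Or.inr ⟨m, hm, j, by simpa using hp⟩

theorem pvScan_eq_any_isIn (s : List Char) :
    pvScan s = pvMarkers.any (fun m => PySem.Chars.isIn m s) := by
  rcases Bool.eq_false_or_eq_true (pvMarkers.any (fun m => PySem.Chars.isIn m s)) with h | h
  · rw [h, pvScan_iff]
    simp only [List.any_eq_true] at h
    obtain ⟨m, hm, hIn⟩ := h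
    obtain ⟨j, hp⟩ := (PySem.Chars.exists_prefix_drop_iff_isIn (sub := m) (s := s)).mpr hIn
    exact ⟨m, hm, j, hp⟩
  · rw [h]
    rw [← Bool.not_eq_true, pvScan_iff]
    simp only [List.any_eq_false, Bool.not_eq_true] at h
    push Not
    intro m hm j hp
    have := (PySem.Chars.exists_prefix_drop_iff_isIn (sub := m) (s := s)).mp ⟨j, hp⟩
    rw [h m hm] at this
    exact absurd this (by simp)

-- ===== VERDICT (by name: the statement is the Claim_ definition above) =====
theorem is_retryable_quota_error_spec : Claim_equal_is_retryable_quota_error := by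
  intro exc _
  unfold Spec_is_retryable_quota_error is_retryable_quota_error is_retryable_quota_error_alt
  rw [pvScan_eq_any_isIn]
  simp [pvMarkers, PySem.Str.isIn_eq, PySem.Str.toList_lower]
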